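-- pv_equiv track=rewrite | github.com/RohitPoduval1/UMN-Classes | CSCI_1133H/labs/lab7/translate.py | move_beginning_consonants_to_end
-- ===== SOURCE A (Python) =====
-- from string import punctuation
--
-- vowels = ["a", "e", "i", "o", "u"]
--
-- def move_beginning_consonants_to_end(word):
--     beginning_consonants = ""
--
--     # remove any punctuation present in "word"
--     for punct in punctuation:
--         word = word.replace(punct, "")
--
--     # get the first consecutive consonants from "word"
--     for letter in word:
--         if letter.lower() not in vowels:
--             beginning_consonants += letter.lower()
--         else:
--             break
--
--     word_as_list = list(word)
--     del word_as_list[:len(beginning_consonants)]  # remove the first beginning_consonants number of characters from the start of the string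
--     return str.join("", word_as_list) + beginning_consonants
-- ===== SOURCE B (Python) =====
-- from string import punctuation
--
-- vowels = ["a", "e", "i", "o", "u"]
--
-- def move_beginning_consonants_to_end(word):
--     cleaned = "".join(c for c in word if c not in punctuation)
--     i = next((j for j, c in enumerate(cleaned) if c.lower() in vowels), len(cleaned))
--     return cleaned[i:] + cleaned[:i].lower()
-- ===== Notes on version B (the rewrite author's own statement) =====
-- stated objective: simpler
-- what changed: Replaces the per-punctuation-character replace loop, the character-accumulating consonant loop and the list-deletion with one punctuation filter, a first-vowel index computation, and a single slice-and-concatenate.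
import Mathlib
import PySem

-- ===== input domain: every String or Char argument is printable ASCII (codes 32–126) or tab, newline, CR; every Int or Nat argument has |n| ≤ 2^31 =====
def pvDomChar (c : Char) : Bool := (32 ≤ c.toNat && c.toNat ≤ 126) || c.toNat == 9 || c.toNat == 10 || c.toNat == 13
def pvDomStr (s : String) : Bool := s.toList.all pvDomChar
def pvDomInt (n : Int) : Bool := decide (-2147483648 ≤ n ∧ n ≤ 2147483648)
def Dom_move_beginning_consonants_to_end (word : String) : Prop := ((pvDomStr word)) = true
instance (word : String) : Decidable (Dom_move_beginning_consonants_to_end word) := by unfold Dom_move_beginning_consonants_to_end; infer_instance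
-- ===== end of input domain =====

-- B strips punctuation with one filter, finds the first-vowel index and returns one
-- slice-and-concatenate instead of A's replace loop, consonant-accumulating loop and list deletion.

-- string.punctuation, in order
def pvPunctuation : List Char := "!\"#$%&'()*+,-./:;<=>?@[\\]^_`{|}~".toList

-- vowels = ["a","e","i","o","u"] (a list of one-character strings, as List Char each)
def pvVowels : List (List Char) := [['a'], ['e'], ['i'], ['o'], ['u']]

-- ===== PORT A =====
-- for punct in punctuation: word = word.replace(punct, "")
def pvStripPunct (w : List Char) : List Char :=
  pvPunctuation.foldl (fun acc p => PySem.Chars.replace acc [p] []) w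

-- for letter in word: if letter.lower() not in vowels: beginning_consonants += letter.lower() else: break
def pvConsLoop : List Char → List Char
  | [] => []
  | c :: rest =>
      if PySem.Chars.lower [c] ∉ pvVowels then PySem.Chars.lower [c] ++ pvConsLoop rest
      else []

def move_beginning_consonants_to_end (word : String) : String :=
  let w := pvStripPunct word.toList
  let bc := pvConsLoop w
  -- word_as_list = list(word); del word_as_list[:len(bc)]; "".join(...) + bc
  String.mk (w.drop bc.length ++ bc)

-- ===== PORT B =====
def move_beginning_consonants_to_end_alt (word : String) : String :=
  let cleaned := word.toList.filter (fun c => !(pvPunctuation.contains c))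
  let i := cleaned.findIdx (fun c => PySem.Chars.lower [c] ∈ pvVowels)
  String.mk (cleaned.drop i ++ PySem.Chars.lower (cleaned.take i))

-- ===== PRECONDITION & SPEC =====
def Spec_move_beginning_consonants_to_end (word : String) (out : String) : Prop := out = move_beginning_consonants_to_end_alt word
instance (word : String) (out : String) : Decidable (Spec_move_beginning_consonants_to_end word out) := by unfold Spec_move_beginning_consonants_to_end; infer_instance

-- ===== CLAIM (what is proved, stated in full; the proofs are below) =====
def Claim_equal_move_beginning_consonants_to_end : Prop := ∀ (word : String), Dom_move_beginning_consonants_to_end word → Spec_move_beginning_consonants_to_end word (move_beginning_consonants_to_end word)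

-- ===== LEMMAS AND PROOFS =====

-- replace with a one-char pattern and empty replacement is a filter
theorem pv_go_filter (p : Char) : ∀ (fuel : Nat) (l acc : List Char), l.length ≤ fuel →
    PySem.Chars.replace.go [p] [] fuel l acc = acc.reverse ++ l.filter (fun x => !decide (x = p)) := by
  intro fuel
  induction fuel with
  | zero => intro l acc h; simp at h; simp [h, PySem.Chars.replace.go]
  | succ n ih =>
    intro l acc h
    match l with
    | [] => simp [PySem.Chars.replace.go]
    | c :: t =>
      simp only [PySem.Chars.replace.go]
      by_cases hc : c = p
      · simp [hc, List.isPrefixOf]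
        rw [ih t acc (by simpa using h)]
      · simp [List.isPrefixOf, Ne.symm hc]
        rw [ih t (c :: acc) (by simpa using h)]
        simp [hc]

theorem pv_replace_filter (p : Char) (s : List Char) :
    PySem.Chars.replace s [p] [] = s.filter (fun x => !decide (x = p)) := by
  simp [PySem.Chars.replace]
  simpa using pv_go_filter p s.length s [] le_rfl

-- A's replace loop over any punctuation list is B's single filter
theorem pv_strip_eq_filter : ∀ (ps w : List Char),
    ps.foldl (fun acc p => PySem.Chars.replace acc [p] []) w
      = w.filter (fun c => !(ps.contains c)) := by
  intro ps
  induction ps with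
  | nil => intro w; simp
  | cons p t ih =>
    intro w
    rw [List.foldl_cons, pv_replace_filter, ih, List.filter_filter]
    apply List.filter_congr
    intro c _
    by_cases h : c = p <;> simp [h]

-- A's consonant loop is: lowercase the longest non-vowel prefix
theorem pv_consLoop_eq (l : List Char) :
    pvConsLoop l
      = PySem.Chars.lower (l.takeWhile (fun c => !(PySem.Chars.lower [c] ∈ pvVowels : Bool))) := by
  induction l with
  | nil => simp [pvConsLoop, PySem.Chars.lower]
  | cons c t ih =>
    by_cases h : (PySem.Chars.lower [c] ∈ pvVowels : Bool)
    · simp_all [pvConsLoop, PySem.Chars.lower]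
    · simp_all [pvConsLoop, PySem.Chars.lower]

-- the longest non-vowel prefix is exactly take of the first-vowel index
theorem pv_takeWhile_not_eq_take_findIdx (p : Char → Bool) (l : List Char) :
    l.takeWhile (fun c => !p c) = l.take (l.findIdx p) := by
  induction l with
  | nil => simp
  | cons c t ih =>
    by_cases h : p c
    · simp [List.findIdx_cons, h]
    · simp [List.findIdx_cons, h, ih]

theorem pv_drop_min (l : List Char) (i : Nat) : l.drop (min i l.length) = l.drop i := by
  rcases le_total i l.length with h | h
  · rw [min_eq_left h]
  · rw [min_eq_right h, List.drop_length, List.drop_eq_nil_of_le h]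

-- ===== VERDICT (by name: the statement is the Claim_ definition above) =====
theorem move_beginning_consonants_to_end_spec : Claim_equal_move_beginning_consonants_to_end := by
  intro word _
  unfold Spec_move_beginning_consonants_to_end
  unfold move_beginning_consonants_to_end move_beginning_consonants_to_end_alt
  simp only [pvStripPunct, pv_strip_eq_filter, pv_consLoop_eq,
    pv_takeWhile_not_eq_take_findIdx, PySem.Chars.lower, List.length_map,
    List.length_take]
  rw [pv_drop_min]
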